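-- pv_equiv track=rewrite | github.com/LRboyz/blog-api | app/apps/models/permissions.py | append_permission
-- ===== SOURCE A (Python) =====
-- USER_ROLE = {
--     300: '超级管理员',
--     100: '管理员',
--     0: '普通用户'
-- }
--
-- SUPER = ['编辑用户', '添加用户', '查询用户', '删除用户', '添加标签', '编辑标签', '删除标签', '添加分类', '删除分类', '修改分类',
--          '查询日志', '搜索日志', '删除评论', '修改评论', '删除图书', '修改图书']
--
-- ADMIN = ['查询用户', '添加用户', '添加分类', '编辑分类', '添加标签', '编辑标签', '添加图书', '编辑图书', '删除图书', '查询日志',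
--          '搜索日志', '查看评论', '编辑评论']
--
-- USER = ['添加图书', '编辑图书', '删除图书', '查询日志', '搜索日志', '查看评论']
--
-- def append_permission(role):
--     permissions = []
--     roles = {}
--     if role == 300:
--         arr = [{'module': USER_ROLE[role], 'permission': info} for info in SUPER]
--         roles[USER_ROLE[role]] = arr
--         permissions.append(roles)
--         return permissions
--     if role == 100:
--         arr = [{'module': USER_ROLE[role], 'permission': info} for info in ADMIN]
--         roles[USER_ROLE[role]] = arr
--         permissions.append(roles)
--         return permissions
--     if role == 0:
--         arr = [{'module': USER_ROLE[role], 'permission': info} for info in USER]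
--         roles[USER_ROLE[role]] = arr
--         permissions.append(roles)
--         return permissions
-- ===== SOURCE B (Python) =====
-- SUPER = ['编辑用户', '添加用户', '查询用户', '删除用户', '添加标签', '编辑标签', '删除标签', '添加分类', '删除分类', '修改分类',
--          '查询日志', '搜索日志', '删除评论', '修改评论', '删除图书', '修改图书']
--
-- ADMIN = ['查询用户', '添加用户', '添加分类', '编辑分类', '添加标签', '编辑标签', '添加图书', '编辑图书', '删除图书', '查询日志',
--          '搜索日志', '查看评论', '编辑评论']
--
-- USER = ['添加图书', '编辑图书', '删除图书', '查询日志', '搜索日志', '查看评论']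
--
-- ROLE_SPECS = [(300, '超级管理员', SUPER), (100, '管理员', ADMIN), (0, '普通用户', USER)]
--
-- def _build(name, perms):
--     # recursion on the permission list instead of a comprehension
--     if not perms:
--         return []
--     return [{'module': name, 'permission': perms[0]}] + _build(name, perms[1:])
--
-- def _scan(role, specs):
--     # recursive linear scan of the spec list instead of an if-cascade
--     if not specs:
--         return None
--     code, name, perms = specs[0]
--     if code == role:
--         return [{name: _build(name, perms)}]
--     return _scan(role, specs[1:])
--
-- def append_permission(role):
--     return _scan(role, ROLE_SPECS)
-- ===== Notes on version B (the rewrite author's own statement) =====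
-- stated objective: alternative
-- what changed: Replaces the three duplicated if-branches and the list comprehension with a recursive linear scan over a role-spec list plus a structurally recursive builder of the inner list; same result, different decomposition.
import Mathlib
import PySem

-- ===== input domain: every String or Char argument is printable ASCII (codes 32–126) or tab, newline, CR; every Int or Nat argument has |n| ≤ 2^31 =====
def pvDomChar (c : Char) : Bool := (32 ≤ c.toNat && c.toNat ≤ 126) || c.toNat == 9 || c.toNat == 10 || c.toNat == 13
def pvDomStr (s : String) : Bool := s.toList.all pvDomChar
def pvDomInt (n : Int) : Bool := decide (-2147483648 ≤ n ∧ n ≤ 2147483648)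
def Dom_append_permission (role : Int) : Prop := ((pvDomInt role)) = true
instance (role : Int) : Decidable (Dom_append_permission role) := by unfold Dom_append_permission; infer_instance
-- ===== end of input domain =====

-- B replaces the branch cascade + comprehension by a recursive scan over a role-spec list with a recursive inner builder (objective: alternative).

-- ===== PORT A =====
def USER_ROLE : PySem.Dict Int String :=
  PySem.Dict.ofList [(300, "超级管理员"), (100, "管理员"), (0, "普通用户")]

def SUPER : List String := ["编辑用户", "添加用户", "查询用户", "删除用户", "添加标签", "编辑标签", "删除标签", "添加分类", "删除分类", "修改分类",
  "查询日志", "搜索日志", "删除评论", "修改评论", "删除图书", "修改图书"]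

def ADMIN : List String := ["查询用户", "添加用户", "添加分类", "编辑分类", "添加标签", "编辑标签", "添加图书", "编辑图书", "删除图书", "查询日志",
  "搜索日志", "查看评论", "编辑评论"]

def USER : List String := ["添加图书", "编辑图书", "删除图书", "查询日志", "搜索日志", "查看评论"]

def append_permission (role : Int) : Option (List (List (String × List (List (String × String))))) :=
  let permissions : List (List (String × List (List (String × String)))) := []
  let roles : List (String × List (List (String × String))) := []
  if role = 300 then
    let name := (USER_ROLE.get? role).getD ""   -- USER_ROLE[role]; key present in this branch
    let arr := SUPER.map (fun info => [("module", name), ("permission", info)])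
    let roles := roles ++ [(name, arr)]
    some (permissions ++ [roles])
  else if role = 100 then
    let name := (USER_ROLE.get? role).getD ""
    let arr := ADMIN.map (fun info => [("module", name), ("permission", info)])
    let roles := roles ++ [(name, arr)]
    some (permissions ++ [roles])
  else if role = 0 then
    let name := (USER_ROLE.get? role).getD ""
    let arr := USER.map (fun info => [("module", name), ("permission", info)])
    let roles := roles ++ [(name, arr)]
    some (permissions ++ [roles])
  else none

-- ===== PORT B =====
def ROLE_SPECS : List (Int × String × List String) :=
  [(300, "超级管理员", SUPER), (100, "管理员", ADMIN), (0, "普通用户", USER)]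

def pvBuild (name : String) : List String → List (List (String × String))
  | [] => []
  | p :: rest => [("module", name), ("permission", p)] :: pvBuild name rest

def pvScan (role : Int) : List (Int × String × List String) → Option (List (List (String × List (List (String × String)))))
  | [] => none
  | (code, name, perms) :: rest =>
      if code = role then some [[(name, pvBuild name perms)]]
      else pvScan role rest

def append_permission_alt (role : Int) : Option (List (List (String × List (List (String × String))))) :=
  pvScan role ROLE_SPECS

-- ===== PRECONDITION & SPEC =====
def Spec_append_permission (role : Int) (out : Option (List (List (String × List (List (String × String)))))) : Prop := out = append_permission_alt role
instance (role : Int) (out : Option (List (List (String × List (List (String × String)))))) : Decidable (Spec_append_permission role out) := by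
  unfold Spec_append_permission
  have h1 : DecidableEq (List (List (String × String))) := inferInstance
  have h2 : DecidableEq (List (List (String × List (List (String × String))))) := inferInstance
  exact inferInstance

-- ===== CLAIM (what is proved, stated in full; the proofs are below) =====
def Claim_equal_append_permission : Prop := ∀ (role : Int), Dom_append_permission role → Spec_append_permission role (append_permission role)

-- ===== LEMMAS AND PROOFS =====

-- ===== VERDICT (by name: the statement is the Claim_ definition above) =====
set_option maxRecDepth 4000 in
theorem append_permission_spec : Claim_equal_append_permission := by
  intro role _
  unfold Spec_append_permission append_permission append_permission_alt ROLE_SPECS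
  by_cases h3 : role = 300
  · subst h3; rfl
  · by_cases h1 : role = 100
    · subst h1; rfl
    · by_cases h0 : role = 0
      · subst h0; rfl
      · rw [if_neg h3, if_neg h1, if_neg h0]
        have e3 : (300 : Int) ≠ role := fun h => h3 h.symm
        have e1 : (100 : Int) ≠ role := fun h => h1 h.symm
        have e0 : (0 : Int) ≠ role := fun h => h0 h.symm
        simp [pvScan, e3, e1, e0]
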